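-- pv_equiv track=rewrite | github.com/nguyenchiemminhvu/DSA | Problems/Leetcode/MaximumSideLengthOfASquareWithSumLessThanOrEqualToThreshold/solve.py | maxSideLength
-- ===== SOURCE A (Python) =====
-- from typing import List
--
-- def maxSideLength(mat: List[List[int]], threshold: int) -> int:
--     m = len(mat)
--     n = len(mat[0])
--
--     def build_prefix_sum() -> List[List[int]]:
--         if not mat or not mat[0]:
--             return [[0]]
--         rows, cols = len(mat), len(mat[0])
--         ps = [[0] * (cols + 1) for _ in range(rows + 1)]
--         for i in range(rows):
--             row_sum = 0
--             for j in range(cols):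
--                 ps[i + 1][j + 1] = mat[i][j] + ps[i][j + 1] + ps[i + 1][j] - ps[i][j]
--         return ps
--
--     ps = build_prefix_sum()
--
--     def submatrix_sum(ps: List[List[int]], r1: int, c1: int, r2: int, c2: int) -> int:
--         return ps[r2 + 1][c2 + 1] - ps[r1][c2 + 1] - ps[r2 + 1][c1] + ps[r1][c1]
--
--     def check_len(k: int) -> bool:
--         for i in range(m - k + 1):
--             for j in range(n - k + 1):
--                 s = submatrix_sum(ps, i, j, i + k - 1, j + k - 1)
--                 if s <= threshold:
--                     return True
--         return False
--
--     res = 0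
--     left = 1
--     right = min(m, n)
--     while left <= right:
--         mid = left + (right - left) // 2
--         if check_len(mid):
--             res = mid
--             left = mid + 1
--         else:
--             right = mid - 1
--     return res
-- ===== SOURCE B (Python) =====
-- def maxSideLength(mat, threshold):
--     m = len(mat)
--     n = len(mat[0])
--
--     # per-row prefix sums: rp[r][c] = mat[r][0] + ... + mat[r][c-1]
--     rp = []
--     for row in mat:
--         acc = [0]
--         t = 0
--         for j in range(n):
--             t += row[j]
--             acc.append(t)
--         rp.append(acc)
--
--     def ok(k):
--         # does any k x k square have sum <= threshold?  (column-major scan,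
--         # each square summed as k row segments taken from the row prefixes)
--         for j in range(n - k + 1):
--             for i in range(m - k + 1):
--                 s = 0
--                 for r in range(i, i + k):
--                     s += rp[r][j + k] - rp[r][j]
--                 if s <= threshold:
--                     return True
--         return False
--
--     # binary search on the side length is kept on purpose: with negative
--     # entries the predicate is not monotone, so the search path fixes the answer
--     res = 0
--     lo = 1
--     hi = min(m, n)
--     while lo <= hi:
--         mid = (lo + hi) // 2
--         if ok(mid):
--             res = mid
--             lo = mid + 1
--         else:
--             hi = mid - 1
--     return res
-- ===== Notes on version B (the rewrite author's own statement) =====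
-- stated objective: alternative
-- what changed: B replaces A's global 2D prefix-sum table and O(1) rectangle queries by per-row 1D prefix sums with a column-major scan that sums each candidate square as k row segments; the binary search over the side is kept deliberately because with negative entries the square-sum predicate is not monotone, so the probe path determines the exact answer.
import Mathlib
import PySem

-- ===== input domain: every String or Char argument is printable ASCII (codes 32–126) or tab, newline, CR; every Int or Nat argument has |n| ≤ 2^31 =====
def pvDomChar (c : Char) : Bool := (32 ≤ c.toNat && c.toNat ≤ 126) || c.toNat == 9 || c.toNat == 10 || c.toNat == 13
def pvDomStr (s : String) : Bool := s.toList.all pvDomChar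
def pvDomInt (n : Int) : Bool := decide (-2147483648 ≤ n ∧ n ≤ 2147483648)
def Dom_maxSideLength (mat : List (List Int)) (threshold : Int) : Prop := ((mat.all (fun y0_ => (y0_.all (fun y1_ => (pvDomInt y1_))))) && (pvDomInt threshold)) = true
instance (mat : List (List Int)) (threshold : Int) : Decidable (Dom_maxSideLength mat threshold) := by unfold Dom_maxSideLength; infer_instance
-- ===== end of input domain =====

-- B keeps A's binary search (the predicate is not monotone for negative entries, so the
-- probe path fixes the answer) but replaces the 2D prefix-sum table by per-row 1D prefix
-- sums and a column-major scan summing each square as k row segments (objective: alternative).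

-- ===== PORT A =====
-- ps[i][j] (Nat indices, table access during construction)
def pvAget (ps : List (List Int)) (i j : Nat) : Int := (ps.getD i []).getD j 0
-- ps[i][j] = v
def pvAset (ps : List (List Int)) (i j : Nat) (v : Int) : List (List Int) :=
  ps.set i ((ps.getD i []).set j v)
-- ps[r][c] with Int indices (queries; in range on every admitted execution)
def pvAgetI (ps : List (List Int)) (r c : Int) : Int :=
  PySem.List.pyGetD (PySem.List.pyGetD ps r []) c 0

-- build_prefix_sum
def pvAbuild (mat : List (List Int)) : List (List Int) :=
  if mat = [] ∨ mat.headD [] = [] then [[0]]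
  else
    (List.range mat.length).foldl (fun ps i =>
      (List.range (mat.headD []).length).foldl (fun ps j =>
        pvAset ps (i+1) (j+1)
          ((mat.getD i []).getD j 0 + pvAget ps i (j+1) + pvAget ps (i+1) j - pvAget ps i j)) ps)
      (List.replicate (mat.length + 1) (List.replicate ((mat.headD []).length + 1) (0:Int)))

-- submatrix_sum
def pvAsub (ps : List (List Int)) (r1 c1 r2 c2 : Int) : Int :=
  pvAgetI ps (r2+1) (c2+1) - pvAgetI ps r1 (c2+1) - pvAgetI ps (r2+1) c1 + pvAgetI ps r1 c1

-- check_len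
def pvAcheck (ps : List (List Int)) (m n threshold k : Int) : Bool :=
  (PySem.List.pyRange 0 (m - k + 1) 1).any (fun i =>
    (PySem.List.pyRange 0 (n - k + 1) 1).any (fun j =>
      pvAsub ps i j (i+k-1) (j+k-1) ≤ threshold))

-- the while loop (fuel only makes the recursion structural; it is never exhausted
-- on the actual call below, where fuel = interval size + 1 and each pass shrinks the interval)
def pvAloop (check : Int → Bool) : Nat → Int → Int → Int → Int
  | 0, res, _left, _right => res
  | fuel+1, res, left, right =>
    if left ≤ right then
      let mid := left + PySem.Int.floordiv (right - left) 2
      if check mid then pvAloop check fuel mid (mid+1) right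
      else pvAloop check fuel res left (mid-1)
    else res

def maxSideLength (mat : List (List Int)) (threshold : Int) : Int :=
  let m : Int := mat.length
  let n : Int := (mat.headD []).length
  let ps := pvAbuild mat
  pvAloop (pvAcheck ps m n threshold) ((min m n).toNat + 1) 0 1 (min m n)

-- ===== PORT B =====
-- one row of prefix sums: [0, row[0], row[0]+row[1], ...] (n terms added)
def pvBrowpre (n : Nat) (row : List Int) : List Int :=
  ((List.range n).foldl (fun (st : List Int × Int) j =>
      let t := st.2 + row.getD j 0
      (st.1 ++ [t], t)) ([0], 0)).1

def pvBrp (mat : List (List Int)) : List (List Int) :=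
  mat.foldl (fun rp row => rp ++ [pvBrowpre (mat.headD []).length row]) []

-- rp[r][c] with Int indices
def pvBgetI (rp : List (List Int)) (r c : Int) : Int :=
  PySem.List.pyGetD (PySem.List.pyGetD rp r []) c 0

-- ok
def pvBok (rp : List (List Int)) (m n threshold k : Int) : Bool :=
  (PySem.List.pyRange 0 (n - k + 1) 1).any (fun j =>
    (PySem.List.pyRange 0 (m - k + 1) 1).any (fun i =>
      ((PySem.List.pyRange i (i + k) 1).foldl
        (fun s r => s + (pvBgetI rp r (j+k) - pvBgetI rp r j)) 0) ≤ threshold))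

-- the while loop (fuel as above)
def pvBloop (ok : Int → Bool) : Nat → Int → Int → Int → Int
  | 0, res, _lo, _hi => res
  | fuel+1, res, lo, hi =>
    if lo ≤ hi then
      let mid := PySem.Int.floordiv (lo + hi) 2
      if ok mid then pvBloop ok fuel mid (mid+1) hi
      else pvBloop ok fuel res lo (mid-1)
    else res

def maxSideLength_alt (mat : List (List Int)) (threshold : Int) : Int :=
  let m : Int := mat.length
  let n : Int := (mat.headD []).length
  let rp := pvBrp mat
  pvBloop (pvBok rp m n threshold) ((min m n).toNat + 1) 0 1 (min m n)

-- ===== PRECONDITION & SPEC =====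
-- Pre_ excludes exactly the inputs where Python A raises an IndexError:
-- empty mat (mat[0]) and matrices with a row shorter than the first row (mat[i][j]).
def Pre_maxSideLength (mat : List (List Int)) (threshold : Int) : Prop :=
  mat ≠ [] ∧ ∀ row ∈ mat, (mat.headD []).length ≤ row.length
instance (mat : List (List Int)) (threshold : Int) : Decidable (Pre_maxSideLength mat threshold) := by
  unfold Pre_maxSideLength; infer_instance

def pvWitness_maxSideLength : List (List Int) × Int := ([[1, 2], [3, 4]], 3)

def Spec_maxSideLength (mat : List (List Int)) (threshold : Int) (out : Int) : Prop := out = maxSideLength_alt mat threshold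
instance (mat : List (List Int)) (threshold : Int) (out : Int) : Decidable (Spec_maxSideLength mat threshold out) := by unfold Spec_maxSideLength; infer_instance

-- ===== CLAIM (what is proved, stated in full; the proofs are below) =====
def Claim_equal_maxSideLength : Prop := ∀ (mat : List (List Int)) (threshold : Int), Dom_maxSideLength mat threshold → Pre_maxSideLength mat threshold → Spec_maxSideLength mat threshold (maxSideLength mat threshold)

-- ===== LEMMAS AND PROOFS =====

-- mat[r][c] read totally (what both ports read on admitted executions)
def pvE (mat : List (List Int)) (r c : Nat) : Int := (mat.getD r []).getD c 0
-- sum of row r, columns < j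
def pvRowP (mat : List (List Int)) (r j : Nat) : Int :=
  ((List.range j).map (fun c => pvE mat r c)).sum
-- 2D prefix sum: rows < i, columns < j
def pvP (mat : List (List Int)) (i j : Nat) : Int :=
  ((List.range i).map (fun r => pvRowP mat r j)).sum

theorem pvRowP_zero (mat : List (List Int)) (r : Nat) : pvRowP mat r 0 = 0 := by
  simp [pvRowP]

theorem pvRowP_succ (mat : List (List Int)) (r j : Nat) :
    pvRowP mat r (j+1) = pvRowP mat r j + pvE mat r j := by
  simp [pvRowP, List.range_succ]

theorem pvP_zero_left (mat : List (List Int)) (j : Nat) : pvP mat 0 j = 0 := by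
  simp [pvP]

theorem pvP_zero_right (mat : List (List Int)) (i : Nat) : pvP mat i 0 = 0 := by
  simp [pvP, pvRowP_zero]

theorem pvP_succ (mat : List (List Int)) (i j : Nat) :
    pvP mat (i+1) j = pvP mat i j + pvRowP mat i j := by
  simp [pvP, List.range_succ]

theorem pvP_rec (mat : List (List Int)) (i j : Nat) :
    pvP mat (i+1) (j+1) = pvE mat i j + pvP mat i (j+1) + pvP mat (i+1) j - pvP mat i j := by
  have h1 := pvP_succ mat i (j+1)
  have h2 := pvP_succ mat i j
  have h3 := pvRowP_succ mat i j
  omega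

-- the invariant carried through A's table construction
def pvInv (mat : List (List Int)) (m n t j : Nat) (ps : List (List Int)) : Prop :=
  ps.length = m + 1 ∧
  (∀ r : Nat, r < m + 1 → (ps.getD r []).length = n + 1) ∧
  (∀ r c : Nat, r ≤ m → c ≤ n →
    pvAget ps r c = if r ≤ t ∨ (r = t + 1 ∧ c ≤ j) then pvP mat r c else 0)

theorem pvPyGetD_toNat {α : Type} (xs : List α) (i : Int) (d : α) (h0 : 0 ≤ i) (h1 : i < (xs.length : Int)) :
    PySem.List.pyGetD xs i d = xs.getD i.toNat d := by
  rw [PySem.List.pyGetD_eq_getElem xs d h0 h1, List.getD_eq_getElem]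

theorem pvGetD_set {α : Type} (l : List α) (i : Nat) (a : α) (r : Nat) (d : α) :
    (l.set i a).getD r d = if r = i ∧ i < l.length then a else l.getD r d := by
  simp [List.getD_eq_getElem?_getD, List.getElem?_set]
  split_ifs with h1 h2 h3 <;> simp_all

theorem pvAget_pvAset (ps : List (List Int)) (i j : Nat) (v : Int) (r c : Nat)
    (hi : i < ps.length) (hj : j < (ps.getD i []).length) :
    pvAget (pvAset ps i j v) r c = if r = i ∧ c = j then v else pvAget ps r c := by
  unfold pvAget pvAset
  rw [pvGetD_set]
  by_cases hr : r = i
  · subst hr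
    rw [if_pos ⟨rfl, hi⟩, pvGetD_set]
    by_cases hc : c = j
    · rw [if_pos ⟨hc, hj⟩, if_pos ⟨rfl, hc⟩]
    · rw [if_neg (by simp [hc]), if_neg (by simp [hc])]
  · rw [if_neg (by simp [hr]), if_neg (by simp [hr])]

theorem pvAset_length (ps : List (List Int)) (i j : Nat) (v : Int) :
    (pvAset ps i j v).length = ps.length := by
  simp [pvAset]

theorem pvAset_row_length (ps : List (List Int)) (i j : Nat) (v : Int) (r : Nat) :
    ((pvAset ps i j v).getD r []).length = (ps.getD r []).length := by
  unfold pvAset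
  rw [pvGetD_set]
  split_ifs with h
  · obtain ⟨h1, h2⟩ := h; subst h1; simp
  · rfl

theorem pvGetD_replicate {α : Type} (m : Nat) (x : α) (r : Nat) (d : α) :
    (List.replicate m x).getD r d = if r < m then x else d := by
  simp [List.getD_eq_getElem?_getD, List.getElem?_replicate]
  split_ifs <;> rfl

theorem pvInv_init (mat : List (List Int)) (m n : Nat) :
    pvInv mat m n 0 0 (List.replicate (m + 1) (List.replicate (n + 1) (0:Int))) := by
  refine ⟨by simp, fun r hr => by rw [pvGetD_replicate]; simp [hr], fun r c hr hc => ?_⟩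
  have hz : pvAget (List.replicate (m + 1) (List.replicate (n + 1) (0:Int))) r c = 0 := by
    unfold pvAget
    rw [pvGetD_replicate]
    split_ifs with h
    · rw [pvGetD_replicate]; split_ifs <;> rfl
    · rfl
  rw [hz]
  split_ifs with h
  · rcases h with h | ⟨h1, h2⟩
    · interval_cases r
      rw [pvP_zero_left]
    · subst h1
      interval_cases c
      rw [pvP_zero_right]
  · rfl

theorem pvInv_inner_step (mat : List (List Int)) (m n t j : Nat) (ps : List (List Int))
    (hinv : pvInv mat m n t j ps) (ht : t < m) (hj : j < n) :
    pvInv mat m n t (j+1)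
      (pvAset ps (t+1) (j+1)
        ((mat.getD t []).getD j 0 + pvAget ps t (j+1) + pvAget ps (t+1) j - pvAget ps t j)) := by
  obtain ⟨hlen, hrow, hval⟩ := hinv
  have hi : t + 1 < ps.length := by omega
  have hjr : j + 1 < (ps.getD (t+1) []).length := by
    rw [hrow (t+1) (by omega)]; omega
  have h1 : pvAget ps t (j+1) = pvP mat t (j+1) := by
    rw [hval t (j+1) (by omega) (by omega), if_pos (by omega)]
  have h2 : pvAget ps (t+1) j = pvP mat (t+1) j := by
    rw [hval (t+1) j (by omega) (by omega), if_pos (by omega)]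
  have h3 : pvAget ps t j = pvP mat t j := by
    rw [hval t j (by omega) (by omega), if_pos (by omega)]
  refine ⟨by rw [pvAset_length]; exact hlen,
          fun r hr => by rw [pvAset_row_length]; exact hrow r hr,
          fun r c hrm hcn => ?_⟩
  rw [pvAget_pvAset _ _ _ _ _ _ hi hjr]
  by_cases hrc : r = t + 1 ∧ c = j + 1
  · rw [if_pos hrc, if_pos (by omega)]
    obtain ⟨hr1, hc1⟩ := hrc
    subst hr1; subst hc1
    rw [h1, h2, h3, pvP_rec]
    simp [pvE]
  · rw [if_neg hrc, hval r c hrm hcn]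
    by_cases hcond : r ≤ t ∨ (r = t + 1 ∧ c ≤ j)
    · rw [if_pos hcond, if_pos (by omega)]
    · rw [if_neg hcond, if_neg (by omega)]

theorem pvInv_inner (mat : List (List Int)) (m n t : Nat) (ps : List (List Int))
    (hinv : pvInv mat m n t 0 ps) (ht : t < m) (j : Nat) (hj : j ≤ n) :
    pvInv mat m n t j
      ((List.range j).foldl (fun ps j =>
        pvAset ps (t+1) (j+1)
          ((mat.getD t []).getD j 0 + pvAget ps t (j+1) + pvAget ps (t+1) j - pvAget ps t j)) ps) := by
  induction j with
  | zero => simpa using hinv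
  | succ j ih =>
    rw [List.range_succ, List.foldl_append]
    simp only [List.foldl_cons, List.foldl_nil]
    exact pvInv_inner_step mat m n t j _ (ih (by omega)) ht (by omega)

theorem pvInv_weaken (mat : List (List Int)) (m n t : Nat) (ps : List (List Int))
    (hinv : pvInv mat m n t n ps) : pvInv mat m n (t+1) 0 ps := by
  obtain ⟨hlen, hrow, hval⟩ := hinv
  refine ⟨hlen, hrow, fun r c hrm hcn => ?_⟩
  rw [hval r c hrm hcn]
  by_cases h1 : r ≤ t + 1
  · rw [if_pos (by omega), if_pos (by omega)]
  · by_cases h2 : r = t + 2 ∧ c = 0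
    · rw [if_neg (by omega), if_pos (by omega)]
      obtain ⟨hr1, hc1⟩ := h2
      subst hr1; subst hc1
      rw [pvP_zero_right]
    · rw [if_neg (by omega), if_neg (by omega)]

theorem pvInv_outer (mat : List (List Int)) (m n : Nat) (t : Nat) (ht : t ≤ m) :
    pvInv mat m n t 0
      ((List.range t).foldl (fun ps i =>
        (List.range n).foldl (fun ps j =>
          pvAset ps (i+1) (j+1)
            ((mat.getD i []).getD j 0 + pvAget ps i (j+1) + pvAget ps (i+1) j - pvAget ps i j)) ps)
        (List.replicate (m + 1) (List.replicate (n + 1) (0:Int)))) := by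
  induction t with
  | zero => simpa using pvInv_init mat m n
  | succ t ih =>
    rw [List.range_succ, List.foldl_append]
    simp only [List.foldl_cons, List.foldl_nil]
    exact pvInv_weaken mat m n t _ (pvInv_inner mat m n t _ (ih (by omega)) (by omega) n le_rfl)

theorem pvAbuild_spec (mat : List (List Int)) (hmat : mat ≠ []) (hhead : mat.headD [] ≠ []) :
    pvInv mat mat.length (mat.headD []).length mat.length 0 (pvAbuild mat) := by
  unfold pvAbuild
  rw [if_neg (not_or.mpr ⟨hmat, hhead⟩)]
  exact pvInv_outer mat mat.length (mat.headD []).length mat.length le_rfl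

-- Int-indexed reads of the finished table are pvP
theorem pvAgetI_eq_pvP (mat : List (List Int)) (hmat : mat ≠ []) (hhead : mat.headD [] ≠ [])
    (r c : Int) (hr0 : 0 ≤ r) (hr : r ≤ (mat.length : Int))
    (hc0 : 0 ≤ c) (hc : c ≤ ((mat.headD []).length : Int)) :
    pvAgetI (pvAbuild mat) r c = pvP mat r.toNat c.toNat := by
  obtain ⟨hlen, hrow, hval⟩ := pvAbuild_spec mat hmat hhead
  have hrlen : r < ((pvAbuild mat).length : Int) := by rw [hlen]; push_cast; omega
  have hrN : r.toNat ≤ mat.length := by omega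
  have hcN : c.toNat ≤ (mat.headD []).length := by omega
  have hclen : c < (((pvAbuild mat).getD r.toNat []).length : Int) := by
    rw [hrow r.toNat (by omega)]; push_cast; omega
  unfold pvAgetI
  rw [pvPyGetD_toNat _ _ _ hr0 hrlen, pvPyGetD_toNat _ _ _ hc0 hclen]
  have := hval r.toNat c.toNat hrN hcN
  rw [if_pos (by omega)] at this
  exact this

-- B's row prefix list
theorem pvBrowpre_fold (row : List Int) (n : Nat) :
    ((List.range n).foldl (fun (st : List Int × Int) j =>
        let t := st.2 + row.getD j 0
        (st.1 ++ [t], t)) ([0], 0))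
      = ((List.range (n+1)).map (fun c => ((List.range c).map (fun t => row.getD t 0)).sum),
         ((List.range n).map (fun t => row.getD t 0)).sum) := by
  induction n with
  | zero => simp
  | succ n ih =>
    rw [List.range_succ, List.foldl_append]
    simp only [List.foldl_cons, List.foldl_nil, ih]
    simp only [Prod.mk.injEq]
    constructor
    · rw [List.range_succ (n := n+1), List.map_append]
      simp [List.range_succ (n := n)]
    · simp

theorem pvBrowpre_spec (mat : List (List Int)) (r : Nat) (n : Nat) :
    pvBrowpre n (mat.getD r []) = (List.range (n+1)).map (fun c => pvRowP mat r c) := by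
  unfold pvBrowpre
  rw [pvBrowpre_fold]
  simp [pvRowP, pvE]

theorem pvBgetI_eq_pvRowP (mat : List (List Int)) (r c : Int)
    (hr0 : 0 ≤ r) (hr : r < (mat.length : Int))
    (hc0 : 0 ≤ c) (hc : c ≤ ((mat.headD []).length : Int)) :
    pvBgetI (pvBrp mat) r c = pvRowP mat r.toNat c.toNat := by
  have hrp : pvBrp mat = mat.map (fun row => pvBrowpre (mat.headD []).length row) := by
    unfold pvBrp
    exact PySem.List.foldl_append_singleton_eq_map _ mat []
  have hlen : ((pvBrp mat).length : Int) = (mat.length : Int) := by rw [hrp]; simp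
  unfold pvBgetI
  rw [pvPyGetD_toNat _ _ _ hr0 (by omega)]
  have hrN : r.toNat < mat.length := by omega
  have hrowD : (pvBrp mat).getD r.toNat []
      = (List.range ((mat.headD []).length + 1)).map (fun c => pvRowP mat r.toNat c) := by
    rw [hrp, List.getD_eq_getElem _ _ (by simpa using hrN), List.getElem_map]
    rw [show mat[r.toNat] = mat.getD r.toNat [] from (List.getD_eq_getElem _ _ hrN).symm]
    exact pvBrowpre_spec mat r.toNat (mat.headD []).length
  rw [hrowD]
  rw [pvPyGetD_toNat _ _ _ hc0 (by simp only [List.length_map, List.length_range]; omega)]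
  rw [List.getD_eq_getElem _ _ (by simp only [List.length_map, List.length_range]; omega), List.getElem_map]
  congr 1
  exact List.getElem_range _

-- difference of 2D prefixes is a sum of row segments
theorem pvSum_sub (l : List Nat) (f g : Nat → Int) :
    (l.map (fun x => f x - g x)).sum = (l.map f).sum - (l.map g).sum := by
  induction l with
  | nil => simp
  | cons a l ih =>
    simp only [List.map_cons, List.sum_cons, ih]
    ring

theorem pvP_sub (mat : List (List Int)) (i k c : Nat) :
    pvP mat (i + k) c - pvP mat i c
      = ((List.range k).map (fun t => pvRowP mat (i + t) c)).sum := by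
  induction k with
  | zero => simp
  | succ k ih =>
    have h1 := pvP_succ mat (i + k) c
    rw [show i + (k+1) = (i+k)+1 from rfl, h1]
    rw [List.range_succ, List.map_append, List.sum_append]
    simp only [List.map_cons, List.map_nil, List.sum_cons, List.sum_nil]
    omega

theorem pvBlock_eq (mat : List (List Int)) (i j k : Int)
    (hk1 : 1 ≤ k) (_hkm : k ≤ (mat.length : Int)) (_hkn : k ≤ ((mat.headD []).length : Int))
    (hmat : mat ≠ []) (hhead : mat.headD [] ≠ [])
    (hi0 : 0 ≤ i) (hi : i < (mat.length : Int) - k + 1)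
    (hj0 : 0 ≤ j) (hj : j < ((mat.headD []).length : Int) - k + 1) :
    pvAsub (pvAbuild mat) i j (i+k-1) (j+k-1)
      = (PySem.List.pyRange i (i+k) 1).foldl
          (fun s r => s + (pvBgetI (pvBrp mat) r (j+k) - pvBgetI (pvBrp mat) r j)) 0 := by
  -- RHS: sum of row-segment differences
  rw [PySem.List.pyRange_one, PySem.List.foldl_add, List.map_map, zero_add]
  rw [show i + k - i = k from by ring]
  have hmapped : (List.range k.toNat).map
        ((fun r => pvBgetI (pvBrp mat) r (j+k) - pvBgetI (pvBrp mat) r j) ∘ (fun t : Nat => i + (t:Int)))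
      = (List.range k.toNat).map
        (fun t => pvRowP mat (i.toNat + t) (j+k).toNat - pvRowP mat (i.toNat + t) j.toNat) := by
    apply List.map_congr_left
    intro t ht
    rw [List.mem_range] at ht
    have htk : (t:Int) < k := by omega
    simp only [Function.comp]
    rw [pvBgetI_eq_pvRowP mat (i + t) (j+k) (by omega) (by omega) (by omega) (by omega)]
    rw [pvBgetI_eq_pvRowP mat (i + t) j (by omega) (by omega) hj0 (by omega)]
    rw [show (i + (t:Int)).toNat = i.toNat + t from by omega]
  rw [hmapped, pvSum_sub]
  -- LHS: prefix-sum query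
  unfold pvAsub
  rw [show i + k - 1 + 1 = i + k from by ring, show j + k - 1 + 1 = j + k from by ring]
  rw [pvAgetI_eq_pvP mat hmat hhead (i+k) (j+k) (by omega) (by omega) (by omega) (by omega)]
  rw [pvAgetI_eq_pvP mat hmat hhead i (j+k) hi0 (by omega) (by omega) (by omega)]
  rw [pvAgetI_eq_pvP mat hmat hhead (i+k) j (by omega) (by omega) hj0 (by omega)]
  rw [pvAgetI_eq_pvP mat hmat hhead i j hi0 (by omega) hj0 (by omega)]
  rw [Int.toNat_add hi0 (by omega), Int.toNat_add hj0 (by omega)]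
  have S1 := pvP_sub mat i.toNat k.toNat (j.toNat + k.toNat)
  have S2 := pvP_sub mat i.toNat k.toNat j.toNat
  omega

-- the two checks agree on every admitted side length
theorem pvCheck_eq (mat : List (List Int)) (threshold k : Int)
    (hk1 : 1 ≤ k) (hkm : k ≤ (mat.length : Int)) (hkn : k ≤ ((mat.headD []).length : Int)) :
    pvAcheck (pvAbuild mat) (mat.length : Int) ((mat.headD []).length : Int) threshold k
      = pvBok (pvBrp mat) (mat.length : Int) ((mat.headD []).length : Int) threshold k := by
  have hmat : mat ≠ [] := by
    intro h; subst h; simp at hkm; omega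
  have hhead : mat.headD [] ≠ [] := by
    intro h
    rw [h] at hkn; simp at hkn; omega
  rw [Bool.eq_iff_iff]
  simp only [pvAcheck, pvBok, List.any_eq_true, PySem.List.mem_pyRange_one]
  constructor
  · rintro ⟨i, ⟨hi0, hi1⟩, j, ⟨hj0, hj1⟩, hle⟩
    refine ⟨j, ⟨hj0, hj1⟩, i, ⟨hi0, hi1⟩, ?_⟩
    rw [← pvBlock_eq mat i j k hk1 hkm hkn hmat hhead hi0 hi1 hj0 hj1]
    exact hle
  · rintro ⟨j, ⟨hj0, hj1⟩, i, ⟨hi0, hi1⟩, hle⟩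
    refine ⟨i, ⟨hi0, hi1⟩, j, ⟨hj0, hj1⟩, ?_⟩
    rw [pvBlock_eq mat i j k hk1 hkm hkn hmat hhead hi0 hi1 hj0 hj1]
    exact hle

-- the two binary searches agree when the checks agree on [1, N]
theorem pvLoop_eq (cA cB : Int → Bool) (N : Int)
    (hc : ∀ k, 1 ≤ k → k ≤ N → cA k = cB k) :
    ∀ fuel : Nat, ∀ res lo hi : Int, 1 ≤ lo → hi ≤ N →
      pvAloop cA fuel res lo hi = pvBloop cB fuel res lo hi := by
  intro fuel
  induction fuel with
  | zero =>
    intro res lo hi h1 hN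
    rfl
  | succ fuel ih =>
    intro res lo hi h1 hN
    rw [pvAloop, pvBloop]
    by_cases hlh : lo ≤ hi
    · simp only [if_pos hlh]
      have hfd : PySem.Int.floordiv (hi - lo) 2 = (hi - lo) / 2 :=
        PySem.Int.floordiv_eq_ediv_of_pos (by omega)
      have hfd2 : PySem.Int.floordiv (lo + hi) 2 = (lo + hi) / 2 :=
        PySem.Int.floordiv_eq_ediv_of_pos (by omega)
      have hmid : lo + PySem.Int.floordiv (hi - lo) 2 = PySem.Int.floordiv (lo + hi) 2 := by
        rw [hfd, hfd2]; omega
      rw [hmid, hfd2]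
      have hb1 : 1 ≤ (lo + hi) / 2 := by omega
      have hb2 : (lo + hi) / 2 ≤ hi := by omega
      rw [hc _ hb1 (by omega)]
      split_ifs with h2
      · exact ih _ _ _ (by omega) hN
      · exact ih _ _ _ h1 (by omega)
    · simp only [if_neg hlh]

-- ===== VERDICT (by name: the statement is the Claim_ definition above) =====
theorem maxSideLength_spec : Claim_equal_maxSideLength := by
  intro mat threshold _hdom _hpre
  unfold Spec_maxSideLength maxSideLength maxSideLength_alt
  exact pvLoop_eq _ _ (min (mat.length : Int) ((mat.headD []).length : Int))
    (fun k hk1 hkN => pvCheck_eq mat threshold k hk1 (by omega) (by omega))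
    ((min (mat.length : Int) ((mat.headD []).length : Int)).toNat + 1)
    0 1 _ (by omega) (by omega)
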